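-- pv_equiv track=rewrite | github.com/alenti/ScreenTranslator | tools/dictionaries/build_cc_cedict_general_subset.py | is_bad_display
-- ===== SOURCE A (Python) =====
-- def is_bad_display(display: str) -> bool:
--     if not display:
--         return True
--
--     lowercased = display.lower()
--     bad_fragments = [
--         "variant of",
--         "surname",
--         "classifier",
--         "literary",
--         "dialect",
--         "radical",
--         "particle",
--         "abbr.",
--         "see ",
--     ]
--     return any(fragment in lowercased for fragment in bad_fragments)
-- ===== SOURCE B (Python) =====
-- def is_bad_display(display: str) -> bool:
--     if not display:
--         return True
--
--     lowercased = display.lower()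
--     bad_fragments = (
--         "variant of",
--         "surname",
--         "classifier",
--         "literary",
--         "dialect",
--         "radical",
--         "particle",
--         "abbr.",
--         "see ",
--     )
--     # single left-to-right pass: at each position test every fragment as a prefix,
--     # instead of one full substring scan per fragment
--     for i in range(len(lowercased)):
--         for fragment in bad_fragments:
--             if lowercased.startswith(fragment, i):
--                 return True
--     return False
-- ===== Notes on version B (the rewrite author's own statement) =====
-- stated objective: alternative
-- what changed: Replaces the fragment-major loop of per-fragment full-string substring scans with a single position-major left-to-right pass over the string, testing each fragment as a prefix at each position.
import Mathlib
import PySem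

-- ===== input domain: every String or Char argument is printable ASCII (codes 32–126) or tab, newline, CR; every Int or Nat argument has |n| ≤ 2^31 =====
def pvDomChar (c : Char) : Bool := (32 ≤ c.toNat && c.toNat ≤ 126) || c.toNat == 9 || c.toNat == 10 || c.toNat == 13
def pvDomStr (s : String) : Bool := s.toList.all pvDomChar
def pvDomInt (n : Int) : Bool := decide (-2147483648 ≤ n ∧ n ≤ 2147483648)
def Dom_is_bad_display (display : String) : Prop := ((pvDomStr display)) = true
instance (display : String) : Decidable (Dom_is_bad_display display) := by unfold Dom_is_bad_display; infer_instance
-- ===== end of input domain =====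

-- Shared data: the literal bad-fragment list both Pythons carry verbatim.
def pvBadFragments : List (List Char) :=
  ["variant of".toList, "surname".toList, "classifier".toList, "literary".toList,
   "dialect".toList, "radical".toList, "particle".toList, "abbr.".toList, "see ".toList]

-- ===== PORT A =====
-- A: per-fragment 'fragment in lowercased' scans.
def is_bad_display (display : String) : Bool :=
  if display.toList.isEmpty then true
  else
    let lowercased := PySem.Chars.lower display.toList
    pvBadFragments.any (fun f => PySem.Chars.isIn f lowercased)

-- ===== PORT B =====
-- B: one left-to-right pass; at each position test each fragment as a prefix there.
def pvScan (s : List Char) : Bool :=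
  match s with
  | [] => false
  | c :: rest =>
      pvBadFragments.any (fun f => PySem.Chars.startswith (c :: rest) f) || pvScan rest

def is_bad_display_alt (display : String) : Bool :=
  if display.toList.isEmpty then true
  else pvScan (PySem.Chars.lower display.toList)

-- ===== PRECONDITION & SPEC =====
def Spec_is_bad_display (display : String) (out : Bool) : Prop := out = is_bad_display_alt display
instance (display : String) (out : Bool) : Decidable (Spec_is_bad_display display out) := by unfold Spec_is_bad_display; infer_instance

-- ===== CLAIM (what is proved, stated in full; the proofs are below) =====
def Claim_equal_is_bad_display : Prop := ∀ (display : String), Dom_is_bad_display display → Spec_is_bad_display display (is_bad_display display)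

-- ===== LEMMAS AND PROOFS =====

-- The position-major scan equals the fragment-major membership test (all fragments nonempty).
lemma pvScan_eq_any (s : List Char) :
    pvScan s = pvBadFragments.any (fun f => PySem.Chars.isIn f s) := by
  have hne : ∀ f ∈ pvBadFragments, f ≠ [] := by decide
  induction s with
  | nil =>
      simp only [pvScan]
      symm
      simp only [List.any_eq_false]
      intro f hf
      simp [PySem.Chars.isIn_eq_false_iff, List.infix_nil, hne f hf]
  | cons c rest ih =>
      simp only [pvScan, ih]
      rw [Bool.eq_iff_iff]
      simp only [Bool.or_eq_true, List.any_eq_true, PySem.Chars.isIn_iff_infix,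
        PySem.Chars.startswith_iff, List.infix_cons_iff]
      constructor
      · rintro (⟨f, hf, hp⟩ | ⟨f, hf, hi⟩)
        · exact ⟨f, hf, Or.inl hp⟩
        · exact ⟨f, hf, Or.inr hi⟩
      · rintro ⟨f, hf, hp | hi⟩
        · exact Or.inl ⟨f, hf, hp⟩
        · exact Or.inr ⟨f, hf, hi⟩

-- ===== VERDICT (by name: the statement is the Claim_ definition above) =====
theorem is_bad_display_spec : Claim_equal_is_bad_display := by
  intro display _
  unfold Spec_is_bad_display is_bad_display is_bad_display_alt
  by_cases h : display.toList.isEmpty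
  · simp [h]
  · simp [h, pvScan_eq_any]
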